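-- pv_equiv track=rewrite | github.com/smallthinkingmachines/harombe | src/harombe/patterns/data_minimization.py | _parse_classifications
-- ===== SOURCE A (Python) =====
-- from enum import StrEnum
--
-- class SentenceCategory(StrEnum):
--     ESSENTIAL = "essential"
--     CONTEXTUAL = "contextual"
--     SENSITIVE = "sensitive"
--     IRRELEVANT = "irrelevant"
--
-- def _parse_classifications(response_text: str, sentence_count: int) -> list[SentenceCategory]:
--     """Parse the local model's classification response.
--
--     Falls back to ESSENTIAL for any unparseable line (safe default).
--     """
--     results: list[SentenceCategory] = [SentenceCategory.ESSENTIAL] * sentence_count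
--     category_map = {c.value.lower(): c for c in SentenceCategory}
--
--     for line in response_text.strip().splitlines():
--         line = line.strip()
--         if ":" not in line:
--             continue
--         num_part, cat_part = line.split(":", 1)
--         try:
--             idx = int(num_part.strip()) - 1
--         except ValueError:
--             continue
--         cat_key = cat_part.strip().lower()
--         if 0 <= idx < sentence_count and cat_key in category_map:
--             results[idx] = category_map[cat_key]
--
--     return results
-- ===== SOURCE B (Python) =====
-- from enum import StrEnum
--
-- class SentenceCategory(StrEnum):
--     ESSENTIAL = "essential"
--     CONTEXTUAL = "contextual"
--     SENSITIVE = "sensitive"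
--     IRRELEVANT = "irrelevant"
--
-- def _parse_classifications(response_text: str, sentence_count: int) -> list[SentenceCategory]:
--     """Parse the local model's classification response.
--
--     Falls back to ESSENTIAL for any unparseable line (safe default).
--     """
--     valid = {c.value: c for c in SentenceCategory}
--
--     def classify(line: str) -> tuple[int, SentenceCategory] | None:
--         num, sep, cat = line.strip().partition(":")
--         if not sep:
--             return None
--         try:
--             idx = int(num.strip()) - 1
--         except ValueError:
--             return None
--         c = valid.get(cat.strip().lower())
--         return (idx, c) if c is not None and 0 <= idx < sentence_count else None
--
--     parsed = [p for p in map(classify, response_text.strip().splitlines()) if p is not None]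
--     return [next((c for j, c in reversed(parsed) if j == i), SentenceCategory.ESSENTIAL)
--             for i in range(sentence_count)]
-- ===== Notes on version B (the rewrite author's own statement) =====
-- stated objective: alternative
-- what changed: B replaces A's pre-filled mutable results list by a pure two-stage pipeline: a classify helper built on str.partition maps each line to an optional (index, category) pair, the valid pairs are collected into a list, and each output slot is produced by searching that list in reverse for the last pair targeting it (defaulting to ESSENTIAL); no output container is ever mutated.
import Mathlib
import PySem

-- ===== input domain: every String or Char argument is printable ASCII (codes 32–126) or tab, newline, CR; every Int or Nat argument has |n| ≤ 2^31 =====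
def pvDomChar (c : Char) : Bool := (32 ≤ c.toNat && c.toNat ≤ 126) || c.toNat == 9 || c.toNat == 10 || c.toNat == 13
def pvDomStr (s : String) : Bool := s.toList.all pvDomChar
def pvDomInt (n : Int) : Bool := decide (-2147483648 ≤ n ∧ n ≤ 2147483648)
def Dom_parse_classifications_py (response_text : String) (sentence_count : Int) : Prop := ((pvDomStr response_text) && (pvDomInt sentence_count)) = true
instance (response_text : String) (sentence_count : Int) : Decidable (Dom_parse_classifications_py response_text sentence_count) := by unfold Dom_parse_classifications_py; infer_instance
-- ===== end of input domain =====

-- B replaces A's pre-filled mutable results list by a pure pipeline: partition-based line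
-- classification into a list of (index, category) pairs, then a per-slot reverse search
-- (objective: alternative decomposition; no mutation).

-- the members of SentenceCategory, in declaration order (shared module-level context)
def pvSentenceCategories : List String := ["essential", "contextual", "sensitive", "irrelevant"]

-- ===== PORT A =====
-- category_map = {c.value.lower(): c for c in SentenceCategory}
def pvCategoryMapA : PySem.Dict String String :=
  pvSentenceCategories.foldl (fun d c => d.insert (PySem.Str.lower c) c) PySem.Dict.empty

-- A's per-line parsing: the (index, category) assignment a line of the loop performs, if any
def pvParseA? (sentence_count : Int) (line : String) : Option (Int × String) :=
  if PySem.Str.isIn ":" (PySem.Str.strip line) then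
    match PySem.Str.splitMax? (PySem.Str.strip line) ":" 1 with
    | some (num_part :: cat_part :: _) =>
      match PySem.Int.ofStr? (PySem.Str.strip num_part) with
      | some v =>
        if 0 ≤ v - 1 ∧ v - 1 < sentence_count ∧
            pvCategoryMapA.contains (PySem.Str.lower (PySem.Str.strip cat_part)) = true then
          some (v - 1, pvCategoryMapA.getD (PySem.Str.lower (PySem.Str.strip cat_part)) "essential")
        else none
      | none => none
    | _ => none
  else none

-- one iteration of A's for-loop (state: the results list, updated in place)
def pvStepA (sentence_count : Int) (results : List String) (line : String) : List String :=
  match pvParseA? sentence_count line with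
  | some (idx, cat) => PySem.List.pySetD results idx cat
  | none => results

def parse_classifications_py (response_text : String) (sentence_count : Int) : List String :=
  let results := PySem.List.pyRepeat ["essential"] sentence_count
  (PySem.Str.splitlines (PySem.Str.strip response_text)).foldl (pvStepA sentence_count) results

-- ===== PORT B =====
-- valid = {c.value: c for c in SentenceCategory}
def pvValidB : PySem.Dict String String :=
  pvSentenceCategories.foldl (fun d c => d.insert c c) PySem.Dict.empty

-- s.partition(sep), ported by hand (exact: first occurrence of sep splits s into
-- (before, sep, after); (s, "", "") when sep does not occur)
def pvPartition (s sep : String) : String × String × String :=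
  if PySem.Str.isIn sep s then
    match PySem.Str.splitMax? s sep 1 with
    | some (a :: b :: _) => (a, sep, b)
    | _ => (s, "", "")
  else (s, "", "")

-- B's classify helper: optional (index, category) pair for one line; the tuple
-- destructuring 'num, sep, cat = ...partition(":")' is the helper's argument
def pvClassifyParts (sentence_count : Int) (parts : String × String × String) : Option (Int × String) :=
  if parts.2.1 = "" then none
  else
    match PySem.Int.ofStr? (PySem.Str.strip parts.1) with
    | none => none
    | some v =>
      match pvValidB.get? (PySem.Str.lower (PySem.Str.strip parts.2.2)) with
      | some c => if 0 ≤ v - 1 ∧ v - 1 < sentence_count then some (v - 1, c) else none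
      | none => none

def pvClassifyB (sentence_count : Int) (line : String) : Option (Int × String) :=
  pvClassifyParts sentence_count (pvPartition (PySem.Str.strip line) ":")

def parse_classifications_py_alt (response_text : String) (sentence_count : Int) : List String :=
  let parsed := (PySem.Str.splitlines (PySem.Str.strip response_text)).filterMap
    (pvClassifyB sentence_count)
  (PySem.List.pyRange 0 sentence_count 1).map (fun i =>
    ((parsed.reverse.find? (fun p => p.1 == i)).map Prod.snd).getD "essential")

-- ===== PRECONDITION & SPEC =====
def Spec_parse_classifications_py (response_text : String) (sentence_count : Int) (out : List String) : Prop := out = parse_classifications_py_alt response_text sentence_count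
instance (response_text : String) (sentence_count : Int) (out : List String) : Decidable (Spec_parse_classifications_py response_text sentence_count out) := by unfold Spec_parse_classifications_py; infer_instance

-- ===== CLAIM (what is proved, stated in full; the proofs are below) =====
def Claim_equal_parse_classifications_py : Prop := ∀ (response_text : String) (sentence_count : Int), Dom_parse_classifications_py response_text sentence_count → Spec_parse_classifications_py response_text sentence_count (parse_classifications_py response_text sentence_count)

-- ===== LEMMAS AND PROOFS =====

lemma pvValidB_eq : pvCategoryMapA = pvValidB := by decide

lemma pvInner_eq (n v : Int) (key : String) :
    (if 0 ≤ v - 1 ∧ v - 1 < n ∧ pvCategoryMapA.contains key = true then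
       some (v - 1, pvCategoryMapA.getD key "essential")
     else none)
  = (match pvValidB.get? key with
     | some c => if 0 ≤ v - 1 ∧ v - 1 < n then some (v - 1, c) else none
     | none => (none : Option (Int × String))) := by
  rw [pvValidB_eq]
  cases hget : pvValidB.get? key with
  | none =>
    have hcont : pvValidB.contains key = false := by
      rw [PySem.Dict.contains_eq_isSome_get?, hget]; rfl
    show _ = (none : Option (Int × String))
    rw [if_neg (fun h => by rw [hcont] at h; exact Bool.false_ne_true h.2.2)]
  | some cat =>
    have hcont : pvValidB.contains key = true := by
      rw [PySem.Dict.contains_eq_isSome_get?, hget]; rfl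
    have hgd : pvValidB.getD key "essential" = cat :=
      PySem.Dict.getD_of_get?_eq_some _ _ hget
    show _ = (if 0 ≤ v - 1 ∧ v - 1 < n then some (v - 1, cat) else none)
    by_cases hr : 0 ≤ v - 1 ∧ v - 1 < n
    · rw [if_pos ⟨hr.1, hr.2, hcont⟩, if_pos hr, hgd]
    · rw [if_neg (fun h => hr ⟨h.1, h.2.1⟩), if_neg hr]

lemma pvParse_eq (n : Int) (line : String) :
    pvParseA? n line = pvClassifyB n line := by
  unfold pvParseA? pvClassifyB pvPartition
  by_cases hcolon : PySem.Str.isIn ":" (PySem.Str.strip line) = true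
  · rw [if_pos hcolon, if_pos hcolon]
    cases hsp : PySem.Str.splitMax? (PySem.Str.strip line) ":" 1 with
    | none => rfl
    | some parts =>
      match parts with
      | [] => rfl
      | [a] => rfl
      | a :: b :: rest =>
        show (match PySem.Int.ofStr? (PySem.Str.strip a) with
              | some v =>
                if 0 ≤ v - 1 ∧ v - 1 < n ∧
                    pvCategoryMapA.contains (PySem.Str.lower (PySem.Str.strip b)) = true then
                  some (v - 1, pvCategoryMapA.getD (PySem.Str.lower (PySem.Str.strip b)) "essential")
                else none
              | none => none)
            = pvClassifyParts n (a, ":", b)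
        unfold pvClassifyParts
        rw [if_neg (show ¬ ((a, ":", b) : String × String × String).2.1 = "" by simp)]
        rw [show ((a, ":", b) : String × String × String).1 = a from rfl,
            show ((a, ":", b) : String × String × String).2.2 = b from rfl]
        generalize PySem.Int.ofStr? (PySem.Str.strip a) = o
        cases o with
        | none => rfl
        | some v => exact pvInner_eq n v (PySem.Str.lower (PySem.Str.strip b))
  · rw [if_neg hcolon, if_neg hcolon]
    rfl

lemma pvParse_bounds (n : Int) (line : String) (idx : Int) (cat : String)
    (h : pvClassifyB n line = some (idx, cat)) : 0 ≤ idx ∧ idx < n := by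
  unfold pvClassifyB pvClassifyParts at h
  split at h
  · simp at h
  · split at h
    · simp at h
    · split at h
      · split at h
        · injection h with h'
          injection h' with ha hb
          omega
        · simp at h
      · simp at h

-- A's loop skips the lines classify rejects: it is the same as folding the assignments
-- of the accepted lines
lemma pvFoldl_filterMap (n : Int) (lines : List String) (init : List String) :
    lines.foldl (pvStepA n) init
      = (lines.filterMap (pvClassifyB n)).foldl
          (fun r p => PySem.List.pySetD r p.1 p.2) init := by
  induction lines generalizing init with
  | nil => rfl
  | cons l ls ih =>
    simp only [List.foldl_cons, List.filterMap_cons, pvStepA, pvParse_eq]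
    cases pvClassifyB n l with
    | none => exact ih init
    | some p => simp only [List.foldl_cons]; exact ih _

-- the value of each output slot after folding a list of in-bounds assignments is the
-- last assignment targeting it, else "essential"
lemma pvFold_eq_search (n : Int) (ps : List (Int × String))
    (hb : ∀ p ∈ ps, 0 ≤ p.1 ∧ p.1 < n) :
    ps.foldl (fun r p => PySem.List.pySetD r p.1 p.2)
        (PySem.List.pyRepeat ["essential"] n)
      = (PySem.List.pyRange 0 n 1).map (fun i =>
          ((ps.reverse.find? (fun p => p.1 == i)).map Prod.snd).getD "essential") := by
  induction ps using List.reverseRecOn with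
  | nil =>
    rw [PySem.List.pyRepeat_singleton]
    apply List.ext_getElem
    · simp [PySem.List.length_pyRange_one]
    · intro i h1 h2
      simp
  | append_singleton ps q ih =>
    have hq := hb q (by simp)
    have hps : ∀ p ∈ ps, 0 ≤ p.1 ∧ p.1 < n := fun p hp => hb p (by simp [hp])
    rw [List.foldl_append, List.foldl_cons, List.foldl_nil, ih hps,
        PySem.List.pySetD_of_nonneg _ _ hq.1]
    apply List.ext_getElem
    · simp
    · intro i h1 h2
      rw [List.getElem_set]
      simp only [List.getElem_map, PySem.List.getElem_pyRange_one, zero_add,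
        List.reverse_append, List.reverse_cons, List.reverse_nil, List.nil_append,
        List.cons_append, List.find?_cons]
      have hlen : i < n.toNat := by
        have := h1; simpa [PySem.List.length_pyRange_one] using this
      by_cases hc : q.1 = (i : Int)
      · rw [if_pos (by omega : q.1.toNat = i)]
        simp only [show (q.1 == (i : Int)) = true from beq_iff_eq.mpr hc]
        rfl
      · rw [if_neg (by omega : ¬ q.1.toNat = i)]
        simp only [show (q.1 == (i : Int)) = false from beq_eq_false_iff_ne.mpr hc]

-- ===== VERDICT (by name: the statement is the Claim_ definition above) =====
theorem parse_classifications_py_spec : Claim_equal_parse_classifications_py := by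
  intro response_text sentence_count _
  unfold Spec_parse_classifications_py parse_classifications_py parse_classifications_py_alt
  rw [pvFoldl_filterMap]
  exact pvFold_eq_search sentence_count _ (fun p hp => by
    obtain ⟨l, _, hl⟩ := List.mem_filterMap.mp hp
    exact pvParse_bounds _ l p.1 p.2 (by rwa [← Prod.mk.eta (p := p)] at hl))
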